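/- GENERATED by tools/from_farm_form.py from prooffarm-gif/accepted/DGifGetExtension.2/Proof.lean (a worked proof of the farm's unit `DGifGetExtension.2`,
   accepted by the verdict) — do not edit. -/
import Gif.Spec.Units.DGifGetExtension_2
import Gif.Spec.AllSegs
import Gif.Spec.Proved.DGifGetExtension_2_Lemmas

open X86 X86.User Asan ProgX.Base ProgX.Base.Spec Gif.Spec

/-!
  `DGifGetExtension.2` (0x109b45 … 0x109b67, 9 instructions; dgif_lib.c:586-590): A BODY SEGMENT OF A PROTECTED FUNCTION WITH A CALL
  IN THE MIDDLE. The checked store `*ExtCode = Buf` through the caller's out-pointer, then `DGifGetExtensionNext(gif, Extension)`;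
  its result goes to `r12d`, and the segment ends at the epilogue's first instruction 0x109afb. The call's return address 0x109b62
  (`ret7`) is not a cut of the design, so the unit makes it one of its own: the private assertion `ge2_AtRet7` (`Body` + the result
  and the post-clause in terms of `rax`) and two walks (Lemmas.lean), chained here.
-/

/-- Segment 2 of `DGifGetExtension` takes `AfterRead` at 0x109b45 to `Done` at 0x109afb. -/
theorem Gif.Spec.Proved.DGifGetExtension_2_ok : Gif.Spec.DGifGetExtension_2.Statement := by
  intro Lay hLay μ hμ u₀ hcode h_DGifGetExtensionNext h_asan_store4_noabort H rest frames F R e ret v hat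
  -- the callee's contract for the frame list of the body (the own frame in front)
  have hnext := h_DGifGetExtensionNext H rest (DGifGetExtension.framesIn frames e) F R
  -- 0x109b45 … the check, the store of `*ExtCode`, the call … 0x109b62 (ret7)
  refine (Gif.Spec.DGifGetExtension_2.ge2_seg_call Lay hLay μ hμ u₀ hcode H rest frames F R e ret hnext
    h_asan_store4_noabort v hat).trans ?_
  -- 0x109b62 … 0x109afb
  intro v1 hv1
  exact Gif.Spec.DGifGetExtension_2.ge2_seg_tail Lay hLay μ hμ u₀ hcode H rest frames F R e ret v1 hv1
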